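-- pv_equiv track=rewrite | github.com/ChriSil/aoc | 2022_py/02.py | part_one
-- ===== SOURCE A (Python) =====
-- def part_one(data):
--     '''
--     A, X = Rock 1 point
--     B, Y = Paper 2 points
--     C, Z = Scissors 3 points
--     win = 6 points
--     lose = 0 points
--     draw = 3 points
--     '''
--     guide = {'A X': 1 + 3, 'A Y': 2 + 6, 'A Z': 3 + 0,
--              'B X': 1 + 0, 'B Y': 2 + 3, 'B Z': 3 + 6,
--              'C X': 1 + 6, 'C Y': 2 + 0, 'C Z': 3 + 3
--              }  # dict with explicit results, calcs automatically. could also create mapped dict with just the sums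
--     sum = 0
--     for rnd in data:
--         a = guide[rnd]
--         sum = sum + a
--     return sum
-- ===== SOURCE B (Python) =====
-- def part_one(data):
--     opp = {'A': 0, 'B': 1, 'C': 2}
--     mine = {'X': 0, 'Y': 1, 'Z': 2}
--     total = 0
--     for rnd in data:
--         m = mine[rnd[2]]
--         o = opp[rnd[0]]
--         total += (m + 1) + ((m - o + 1) % 3) * 3
--     return total
-- ===== Notes on version B (the rewrite author's own statement) =====
-- stated objective: idiomatic
-- what changed: Replaces the 9-entry string-to-score lookup table with per-round arithmetic: shape score mine+1 plus outcome score ((mine-opp+1)%3)*3 computed from two 3-entry letter maps.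
import Mathlib
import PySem

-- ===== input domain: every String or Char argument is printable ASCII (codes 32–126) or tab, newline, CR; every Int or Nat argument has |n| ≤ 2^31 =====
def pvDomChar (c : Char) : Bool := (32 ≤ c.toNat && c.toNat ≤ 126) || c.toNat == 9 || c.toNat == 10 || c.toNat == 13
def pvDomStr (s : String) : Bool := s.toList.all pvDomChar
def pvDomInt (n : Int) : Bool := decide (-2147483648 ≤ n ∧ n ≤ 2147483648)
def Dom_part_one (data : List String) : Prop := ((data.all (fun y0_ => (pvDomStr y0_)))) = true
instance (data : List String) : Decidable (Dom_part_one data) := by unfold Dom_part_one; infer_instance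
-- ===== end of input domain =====

-- B replaces A's 9-entry string→score table with per-round arithmetic (shape m+1 plus outcome ((m-o+1)%3)*3); idiomatic, return value only.

-- ===== PORT A =====
-- the 9-entry guide dict, built exactly as in A (insertion order)
def pvGuide : PySem.Dict String Int :=
  (((((((((PySem.Dict.empty.insert "A X" (1 + 3)).insert "A Y" (2 + 6)).insert "A Z" (3 + 0)).insert
    "B X" (1 + 0)).insert "B Y" (2 + 3)).insert "B Z" (3 + 6)).insert
    "C X" (1 + 6)).insert "C Y" (2 + 0)).insert "C Z" (3 + 3))

def part_one (data : List String) : Int :=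
  -- guide[rnd] raises KeyError when rnd is not a key; Pre_ excludes that (get? = none there)
  data.foldl (fun sum rnd => sum + (pvGuide.get? rnd).getD 0) 0

-- ===== PORT B =====
def pvOpp : PySem.Dict Char Int :=
  ((PySem.Dict.empty.insert 'A' 0).insert 'B' 1).insert 'C' 2
def pvMine : PySem.Dict Char Int :=
  ((PySem.Dict.empty.insert 'X' 0).insert 'Y' 1).insert 'Z' 2

-- one round's score: mine[rnd[2]] and opp[rnd[0]] raise on bad input; Pre_ excludes that
def pvScore (rnd : String) : Int :=
  let m := (((PySem.Str.pyGet? rnd 2).bind (fun c => pvMine.get? c)).getD 0)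
  let o := (((PySem.Str.pyGet? rnd 0).bind (fun c => pvOpp.get? c)).getD 0)
  (m + 1) + (PySem.Int.mod (m - o + 1) 3) * 3

def part_one_alt (data : List String) : Int :=
  data.foldl (fun total rnd => total + pvScore rnd) 0

-- ===== PRECONDITION & SPEC =====
-- Pre_ excludes inputs on which A raises KeyError: every round string must be one of the 9 guide keys.
def Pre_part_one (data : List String) : Prop :=
  ∀ s ∈ data, s = "A X" ∨ s = "A Y" ∨ s = "A Z" ∨ s = "B X" ∨ s = "B Y" ∨ s = "B Z" ∨
              s = "C X" ∨ s = "C Y" ∨ s = "C Z"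
instance (data : List String) : Decidable (Pre_part_one data) := by unfold Pre_part_one; infer_instance
def pvWitness_part_one : List String := ["A Y", "B X", "C Z"]

def Spec_part_one (data : List String) (out : Int) : Prop := out = part_one_alt data
instance (data : List String) (out : Int) : Decidable (Spec_part_one data out) := by unfold Spec_part_one; infer_instance

-- ===== CLAIM =====
def Claim_equal_part_one : Prop :=
  ∀ (data : List String), Dom_part_one data → Pre_part_one data → Spec_part_one data (part_one data)

-- ===== LEMMAS AND PROOFS =====
-- the two per-round scores agree on each of the 9 valid round strings
theorem pvScore_eq (s : String)
    (h : s = "A X" ∨ s = "A Y" ∨ s = "A Z" ∨ s = "B X" ∨ s = "B Y" ∨ s = "B Z" ∨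
         s = "C X" ∨ s = "C Y" ∨ s = "C Z") :
    (pvGuide.get? s).getD 0 = pvScore s := by
  rcases h with h | h | h | h | h | h | h | h | h <;> subst h <;> decide

theorem pv_foldl_eq (data : List String) (hp : Pre_part_one data) (acc : Int) :
    data.foldl (fun sum rnd => sum + (pvGuide.get? rnd).getD 0) acc =
    data.foldl (fun total rnd => total + pvScore rnd) acc := by
  induction data generalizing acc with
  | nil => rfl
  | cons hd tl ih =>
    simp only [List.foldl_cons]
    rw [pvScore_eq hd (hp hd (List.mem_cons_self))]
    exact ih (fun s hs => hp s (List.mem_cons_of_mem _ hs)) _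

-- ===== VERDICT =====
theorem part_one_spec : Claim_equal_part_one := by
  intro data _ hp
  unfold Spec_part_one part_one part_one_alt
  exact pv_foldl_eq data hp 0
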